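-- pv_equiv track=rewrite | github.com/iliao2345/Battlecode2022 | write_pathfinding_algorithm_18.py | get_statics
-- ===== SOURCE A (Python) =====
-- def get_statics(max_r2):
--     contents = "\tprivate static boolean on_map_calculated = false;\n\tprivate static boolean cheap_dists_calculated = false;\n\tprivate static boolean expensive_dists_calculated = false;\n"
--     for r2 in range(0, max_r2+1):
--         for i in range(11):
--             dx = i-5
--             for j in range(11):
--                 dy = j-5
--                 if dx**2+dy**2==r2:
--                     contents = contents + "\tprivate static double dist_" + str(i)+str(j) + " = 0;\n"
--     for r2 in range(0, max_r2+1):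
--         for i in range(11):
--             dx = i-5
--             for j in range(11):
--                 dy = j-5
--                 if dx**2+dy**2==r2:
--                     contents = contents + "\tprivate static double encoded_dist_" + str(i)+str(j) + " = 0;\n"
--     for i in range(11):
--         dx = i-5
--         contents = contents + "\tprivate static boolean on_map_x_" + str(i) + " = true;\n"
--     for j in range(11):
--         dy = j-5
--         contents = contents + "\tprivate static boolean on_map_y_" + str(j) + " = true;\n"
--     return contents
-- ===== SOURCE B (Python) =====
-- def get_statics(max_r2):
--     # Bucket the 11x11 cells by squared distance once, instead of scanning
--     # all 121 cells for every r2 in range(max_r2+1).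
--     buckets = {}
--     for i in range(11):
--         for j in range(11):
--             buckets.setdefault((i - 5) ** 2 + (j - 5) ** 2, []).append((i, j))
--     order = [ij for d in sorted(buckets) if d <= max_r2 for ij in buckets[d]]
--     lines = ["\tprivate static boolean on_map_calculated = false;\n"
--              "\tprivate static boolean cheap_dists_calculated = false;\n"
--              "\tprivate static boolean expensive_dists_calculated = false;\n"]
--     lines += ["\tprivate static double dist_%d%d = 0;\n" % ij for ij in order]
--     lines += ["\tprivate static double encoded_dist_%d%d = 0;\n" % ij for ij in order]
--     lines += ["\tprivate static boolean on_map_x_%d = true;\n" % i for i in range(11)]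
--     lines += ["\tprivate static boolean on_map_y_%d = true;\n" % j for j in range(11)]
--     return "".join(lines)
-- ===== Notes on version B (the rewrite author's own statement) =====
-- stated objective: faster
-- what changed: B buckets the 11x11 board cells by squared distance in one pass and walks the sorted distances up to max_r2, instead of rescanning every cell for each r2 in range(max_r2+1), and builds the output by joining a list of lines instead of repeated string concatenation.
import Mathlib
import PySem

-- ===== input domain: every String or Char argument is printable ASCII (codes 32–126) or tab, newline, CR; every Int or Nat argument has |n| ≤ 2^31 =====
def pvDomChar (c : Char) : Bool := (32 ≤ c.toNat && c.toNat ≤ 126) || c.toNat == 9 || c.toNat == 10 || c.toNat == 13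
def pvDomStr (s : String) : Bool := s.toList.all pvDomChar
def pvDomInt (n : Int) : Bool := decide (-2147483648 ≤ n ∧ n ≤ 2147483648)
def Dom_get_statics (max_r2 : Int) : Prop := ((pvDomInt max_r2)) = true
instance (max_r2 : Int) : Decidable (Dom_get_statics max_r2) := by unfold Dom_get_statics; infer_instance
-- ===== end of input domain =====

-- B buckets the 121 board cells by squared distance once and walks the sorted
-- distances, instead of rescanning all 121 cells for every r2 in range(max_r2+1).

-- ===== PORT A =====
def pvHeader : String := "\tprivate static boolean on_map_calculated = false;\n\tprivate static boolean cheap_dists_calculated = false;\n\tprivate static boolean expensive_dists_calculated = false;\n"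

-- one iteration of A's `for r2` body: the nested `for i` / `for j` scan
def pvDistPass (pre : String) (r2 : Int) (c : String) : String :=
  (PySem.List.pyRange 0 11).foldl (fun c i =>
    let dx := i - 5
    (PySem.List.pyRange 0 11).foldl (fun c j =>
      let dy := j - 5
      if dx^2 + dy^2 = r2 then
        c ++ pre ++ PySem.Int.toStr i ++ PySem.Int.toStr j ++ " = 0;\n"
      else c) c) c

def get_statics (max_r2 : Int) : String :=
  let contents := pvHeader
  let contents := (PySem.List.pyRange 0 (max_r2+1)).foldl
    (fun c r2 => pvDistPass "\tprivate static double dist_" r2 c) contents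
  let contents := (PySem.List.pyRange 0 (max_r2+1)).foldl
    (fun c r2 => pvDistPass "\tprivate static double encoded_dist_" r2 c) contents
  let contents := (PySem.List.pyRange 0 11).foldl
    (fun c i => c ++ "\tprivate static boolean on_map_x_" ++ PySem.Int.toStr i ++ " = true;\n") contents
  let contents := (PySem.List.pyRange 0 11).foldl
    (fun c j => c ++ "\tprivate static boolean on_map_y_" ++ PySem.Int.toStr j ++ " = true;\n") contents
  contents

-- ===== PORT B =====
-- Source B's bucket table `buckets` (it does not depend on the argument)
def pvBuckets : PySem.Dict Int (List (Int × Int)) :=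
  (PySem.List.pyRange 0 11).foldl (fun b i =>
    (PySem.List.pyRange 0 11).foldl (fun b j =>
      let d := (i-5)^2 + (j-5)^2
      PySem.Dict.insert b d (PySem.Dict.getD b d [] ++ [(i, j)])) b)
    PySem.Dict.empty

-- Source B's `sorted(buckets)`: the bucket keys in increasing order
def pvK : List Int := PySem.List.sorted (PySem.Dict.keys pvBuckets) (fun d => d) false

-- Source B's `order` comprehension: sorted bucket keys ≤ max_r2, flattened
def pvOrder (max_r2 : Int) : List (Int × Int) :=
  (pvK.filter (fun d => decide (d ≤ max_r2))).flatMap (fun d => PySem.Dict.getD pvBuckets d [])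

def get_statics_alt (max_r2 : Int) : String :=
  let order := pvOrder max_r2
  let lines := [pvHeader]
  let lines := lines ++ order.map (fun ij =>
    "\tprivate static double dist_" ++ PySem.Int.toStr ij.1 ++ PySem.Int.toStr ij.2 ++ " = 0;\n")
  let lines := lines ++ order.map (fun ij =>
    "\tprivate static double encoded_dist_" ++ PySem.Int.toStr ij.1 ++ PySem.Int.toStr ij.2 ++ " = 0;\n")
  let lines := lines ++ (PySem.List.pyRange 0 11).map
    (fun i => "\tprivate static boolean on_map_x_" ++ PySem.Int.toStr i ++ " = true;\n")
  let lines := lines ++ (PySem.List.pyRange 0 11).map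
    (fun j => "\tprivate static boolean on_map_y_" ++ PySem.Int.toStr j ++ " = true;\n")
  PySem.Str.join "" lines

-- ===== PRECONDITION & SPEC =====
def Spec_get_statics (max_r2 : Int) (out : String) : Prop := out = get_statics_alt max_r2
instance (max_r2 : Int) (out : String) : Decidable (Spec_get_statics max_r2 out) := by unfold Spec_get_statics; infer_instance

-- ===== CLAIM (what is proved, stated in full; the proofs are below) =====
def Claim_equal_get_statics : Prop := ∀ (max_r2 : Int), Dom_get_statics max_r2 → Spec_get_statics max_r2 (get_statics max_r2)

-- ===== LEMMAS AND PROOFS =====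

-- squared distance of a cell, and the 121 cells in A's (i, j) scan order
def pvDist (ij : Int × Int) : Int := (ij.1 - 5)^2 + (ij.2 - 5)^2

def pvCells : List (Int × Int) :=
  (PySem.List.pyRange 0 11).flatMap (fun i => (PySem.List.pyRange 0 11).map (fun j => (i, j)))

-- cells with squared distance = r2, in scan order (what one r2 pass of A emits)
def pvAt (r2 : Int) : List (Int × Int) := pvCells.filter (fun ij => decide (pvDist ij = r2))

-- A's emission order over r2 = 0 .. max_r2
def pvL (max_r2 : Int) : List (Int × Int) :=
  (PySem.List.pyRange 0 (max_r2+1)).flatMap pvAt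

-- join "" distributes over list structure
theorem js_nil : PySem.Str.join "" ([] : List String) = "" := by
  simp [PySem.Str.join.eq_1, PySem.Chars.join_nil]

theorem js_cons (s : String) (l : List String) :
    PySem.Str.join "" (s :: l) = s ++ PySem.Str.join "" l := by
  cases l with
  | nil =>
    simp [PySem.Str.join.eq_1, PySem.Chars.join_singleton, PySem.Chars.join_nil,
      String.ofList_toList]
  | cons t r =>
    rw [PySem.Str.join.eq_1, PySem.Str.join.eq_1]
    simp only [List.map_cons]
    rw [PySem.Chars.join_cons_cons]
    simp [String.ofList_append, String.ofList_toList]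

theorem js_append (l1 l2 : List String) :
    PySem.Str.join "" (l1 ++ l2) = PySem.Str.join "" l1 ++ PySem.Str.join "" l2 := by
  induction l1 with
  | nil => simp [js_nil]
  | cons s t ih => simp [js_cons, ih, String.append_assoc]

theorem js_flatMap {α : Type} (g : α → List String) (l : List α) :
    PySem.Str.join "" (l.flatMap g) = PySem.Str.join "" (l.map (fun a => PySem.Str.join "" (g a))) := by
  induction l with
  | nil => simp
  | cons a t ih => simp [js_cons, js_append, ih]

-- a Python loop appending strings is the join of the mapped list
theorem foldl_strapp {α : Type} (f : α → String) (l : List α) (c : String) :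
    l.foldl (fun c x => c ++ f x) c = c ++ PySem.Str.join "" (l.map f) := by
  induction l generalizing c with
  | nil => simp [js_nil]
  | cons a t ih => simp [List.foldl_cons, ih, js_cons, String.append_assoc]

theorem foldl_strapp_ite {α : Type} (p : α → Prop) [DecidablePred p] (f : α → String)
    (l : List α) (c : String) :
    l.foldl (fun c x => if p x then c ++ f x else c) c
      = c ++ PySem.Str.join "" ((l.filter (fun x => decide (p x))).map f) := by
  induction l generalizing c with
  | nil => simp [js_nil]
  | cons a t ih =>
    by_cases h : p a
    · simp [List.foldl_cons, h, ih, js_cons, String.append_assoc]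
    · simp [List.foldl_cons, h, ih]

-- one r2 pass of A emits exactly the lines of the cells at that squared distance
theorem pass_eq (pre : String) (r2 : Int) (c : String) :
    pvDistPass pre r2 c
      = c ++ PySem.Str.join "" ((pvAt r2).map (fun ij =>
          pre ++ (PySem.Int.toStr ij.1 ++ (PySem.Int.toStr ij.2 ++ " = 0;\n")))) := by
  unfold pvDistPass pvAt pvCells
  simp only [String.append_assoc]
  have hin : ∀ (c : String) (i : Int),
      (PySem.List.pyRange 0 11).foldl (fun c j =>
        if (i - 5)^2 + (j - 5)^2 = r2 then
          c ++ (pre ++ (PySem.Int.toStr i ++ (PySem.Int.toStr j ++ " = 0;\n")))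
        else c) c
      = c ++ PySem.Str.join "" (((PySem.List.pyRange 0 11).filter
          (fun j => decide ((i - 5)^2 + (j - 5)^2 = r2))).map (fun j =>
          pre ++ (PySem.Int.toStr i ++ (PySem.Int.toStr j ++ " = 0;\n")))) := by
    intro c i
    exact foldl_strapp_ite (fun j => (i - 5)^2 + (j - 5)^2 = r2) _ _ c
  rw [PySem.List.foldl_congr_mem _ _
    (fun c i => c ++ PySem.Str.join "" (((PySem.List.pyRange 0 11).filter
      (fun j => decide ((i - 5)^2 + (j - 5)^2 = r2))).map (fun j =>
      pre ++ (PySem.Int.toStr i ++ (PySem.Int.toStr j ++ " = 0;\n"))))) c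
    (fun acc i _ => hin acc i)]
  rw [foldl_strapp]
  congr 1
  rw [List.filter_flatMap, List.map_flatMap, js_flatMap]
  congr 1
  apply List.map_congr_left
  intro i _
  congr 1
  rw [List.filter_map, List.map_map]
  rfl

-- Source B's bucket table, rebuilt as a single fold over the cell list
theorem buckets_eq : pvBuckets = pvCells.foldl (fun b ij =>
    PySem.Dict.insert b (pvDist ij) (PySem.Dict.getD b (pvDist ij) [] ++ [ij]))
    PySem.Dict.empty := by
  unfold pvBuckets pvCells
  rw [List.foldl_flatMap]
  apply PySem.List.foldl_congr_mem
  intro acc i _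
  rw [List.foldl_map]
  rfl

theorem bucket_inv (cs : List (Int × Int)) (b : PySem.Dict Int (List (Int × Int))) (d : Int) :
    PySem.Dict.getD (cs.foldl (fun b ij =>
      PySem.Dict.insert b (pvDist ij) (PySem.Dict.getD b (pvDist ij) [] ++ [ij])) b) d []
    = PySem.Dict.getD b d [] ++ cs.filter (fun ij => decide (pvDist ij = d)) := by
  induction cs generalizing b with
  | nil => simp
  | cons ij t ih =>
    simp only [List.foldl_cons, List.filter_cons]
    by_cases h : pvDist ij = d
    · subst h
      rw [ih, PySem.Dict.getD_insert_self]
      simp [List.append_assoc]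
    · rw [ih, PySem.Dict.getD_insert_of_ne _ _ _ (Ne.symm h)]
      simp [h]

-- the bucket of d is exactly the cells at squared distance d, in scan order
theorem factF (d : Int) :
    PySem.Dict.getD pvBuckets d [] = pvCells.filter (fun ij => decide (pvDist ij = d)) := by
  rw [buckets_eq, bucket_inv]
  simp

-- splitting a strictly increasing list's prefix-filter at c
theorem filter_le_split (K : List Int) (hK : K.Pairwise (· < ·)) (c : Int) :
    K.filter (fun x => decide (x ≤ c))
      = K.filter (fun x => decide (x ≤ c - 1)) ++ K.filter (fun x => decide (x = c)) := by
  induction K with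
  | nil => simp
  | cons k t ih =>
    have hk : ∀ x ∈ t, k < x := (List.pairwise_cons.mp hK).1
    have ht := (List.pairwise_cons.mp hK).2
    simp only [List.filter_cons]
    rcases lt_trichotomy k c with h | h | h
    · simp only [show decide (k ≤ c) = true from by simp; omega,
        show decide (k ≤ c - 1) = true from by simp; omega,
        show decide (k = c) = false from by simp; omega]
      simp [ih ht]
    · have h1 : t.filter (fun x => decide (x ≤ c)) = [] :=
        List.filter_eq_nil_iff.mpr (fun x hx => by have := hk x hx; simp; omega)
      have h2 : t.filter (fun x => decide (x ≤ c - 1)) = [] :=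
        List.filter_eq_nil_iff.mpr (fun x hx => by have := hk x hx; simp; omega)
      have h3 : t.filter (fun x => decide (x = c)) = [] :=
        List.filter_eq_nil_iff.mpr (fun x hx => by have := hk x hx; simp; omega)
      simp only [show decide (k ≤ c) = true from by simp; omega,
        show decide (k ≤ c - 1) = false from by simp; omega,
        show decide (k = c) = true from by simp; omega]
      simp [h1, h3]
      intro a ha
      have := hk a ha
      omega
    · simp only [show decide (k ≤ c) = false from by simp; omega,
        show decide (k ≤ c - 1) = false from by simp; omega,
        show decide (k = c) = false from by simp; omega]
      simp [ih ht]

theorem filter_eq_single (K : List Int) (hK : K.Pairwise (· < ·)) (c : Int) (hc : c ∈ K) :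
    K.filter (fun x => decide (x = c)) = [c] := by
  induction K with
  | nil => cases hc
  | cons k t ih =>
    have hk : ∀ x ∈ t, k < x := (List.pairwise_cons.mp hK).1
    have ht := (List.pairwise_cons.mp hK).2
    simp only [List.filter_cons]
    rcases List.mem_cons.mp hc with h | h
    · have h1 : t.filter (fun x => decide (x = c)) = [] :=
        List.filter_eq_nil_iff.mpr (fun x hx => by have := hk x hx; simp; omega)
      simp only [show decide (k = c) = true from by simp; omega]
      simp [h]
      intro a ha
      have := hk a ha
      omega
    · have := hk c h
      simp only [show decide (k = c) = false from by simp; omega]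
      exact ih ht h

set_option maxRecDepth 40000 in
theorem pvK_pairwise : pvK.Pairwise (· < ·) := by decide

set_option maxRecDepth 40000 in
theorem pvK_nonneg : ∀ x ∈ pvK, 0 ≤ x := by decide

theorem pvK_mem_iff (c : Int) : c ∈ pvK ↔ c ∈ PySem.Dict.keys pvBuckets :=
  (PySem.List.sorted_perm _ _ _).mem_iff

-- A's emission order up to n equals Source B's order (for nonnegative bounds)
set_option maxRecDepth 40000 in
theorem center (n : Nat) : pvL (n : Int) = pvOrder (n : Int) := by
  induction n with
  | zero =>
    unfold pvL pvOrder
    rw [show ((0 : Nat) : Int) + 1 = 1 by norm_num]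
    rw [show PySem.List.pyRange 0 1 = [0] from by decide]
    rw [show pvK.filter (fun d => decide (d ≤ ((0 : Nat) : Int))) = [0] from by
      simp only [Nat.cast_zero]
      decide]
    simp [pvAt, factF]
  | succ n ih =>
    unfold pvL pvOrder
    rw [show ((n + 1 : Nat) : Int) + 1 = ((n : Int) + 1) + 1 by push_cast; ring]
    rw [PySem.List.pyRange_one_succ_right (by positivity)]
    rw [List.flatMap_append]
    have hsplit := filter_le_split pvK pvK_pairwise ((n : Int) + 1)
    rw [show ((n + 1 : Nat) : Int) = (n : Int) + 1 by push_cast; ring]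
    rw [hsplit, show (n : Int) + 1 - 1 = (n : Int) by ring, List.flatMap_append]
    have hfirst : pvL (n : Int) = (pvK.filter (fun x => decide (x ≤ (n : Int)))).flatMap
        (fun d => PySem.Dict.getD pvBuckets d []) := ih
    unfold pvL at hfirst
    rw [← hfirst]
    congr 1
    by_cases hmem : ((n : Int) + 1) ∈ pvK
    · rw [filter_eq_single pvK pvK_pairwise _ hmem]
      simp [pvAt, factF]
    · have h1 : pvK.filter (fun x => decide (x = (n : Int) + 1)) = [] :=
        List.filter_eq_nil_iff.mpr (fun x hx => by
          simp
          intro h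
          exact hmem (h ▸ hx))
      have h2 : PySem.Dict.contains pvBuckets ((n : Int) + 1) = false := by
        rw [← Bool.not_eq_true, PySem.Dict.contains_iff_mem_keys]
        exact fun h => hmem ((pvK_mem_iff _).mpr h)
      have h3 := factF ((n : Int) + 1)
      rw [PySem.Dict.getD_of_not_contains _ _ h2] at h3
      simp [pvAt, h1, ← h3]

-- both programs, normalised to the same shape around a cell list L
def pvCanon (L : List (Int × Int)) : String :=
  pvHeader ++ (PySem.Str.join "" (L.map (fun ij =>
      "\tprivate static double dist_" ++ (PySem.Int.toStr ij.1 ++ (PySem.Int.toStr ij.2 ++ " = 0;\n"))))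
    ++ (PySem.Str.join "" (L.map (fun ij =>
      "\tprivate static double encoded_dist_" ++ (PySem.Int.toStr ij.1 ++ (PySem.Int.toStr ij.2 ++ " = 0;\n"))))
    ++ (PySem.Str.join "" ((PySem.List.pyRange 0 11).map
      (fun i => "\tprivate static boolean on_map_x_" ++ (PySem.Int.toStr i ++ " = true;\n")))
    ++ PySem.Str.join "" ((PySem.List.pyRange 0 11).map
      (fun j => "\tprivate static boolean on_map_y_" ++ (PySem.Int.toStr j ++ " = true;\n"))))))

theorem hA (m : Int) : get_statics m = pvCanon (pvL m) := by
  unfold get_statics pvCanon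
  simp only [String.append_assoc]
  simp only [pass_eq]
  rw [foldl_strapp (fun r2 : Int => PySem.Str.join "" ((pvAt r2).map (fun ij =>
      "\tprivate static double dist_" ++ (PySem.Int.toStr ij.1 ++ (PySem.Int.toStr ij.2 ++ " = 0;\n")))))]
  rw [foldl_strapp (fun r2 : Int => PySem.Str.join "" ((pvAt r2).map (fun ij =>
      "\tprivate static double encoded_dist_" ++ (PySem.Int.toStr ij.1 ++ (PySem.Int.toStr ij.2 ++ " = 0;\n")))))]
  rw [foldl_strapp (fun i : Int => "\tprivate static boolean on_map_x_" ++ (PySem.Int.toStr i ++ " = true;\n"))]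
  rw [foldl_strapp (fun j : Int => "\tprivate static boolean on_map_y_" ++ (PySem.Int.toStr j ++ " = true;\n"))]
  unfold pvL
  rw [← js_flatMap, ← js_flatMap, ← List.map_flatMap, ← List.map_flatMap]
  simp only [String.append_assoc]

theorem hB (m : Int) : get_statics_alt m = pvCanon (pvOrder m) := by
  unfold get_statics_alt pvCanon
  simp only [List.append_assoc, List.cons_append, List.nil_append]
  rw [js_cons, js_append, js_append, js_append]
  simp [String.append_assoc]

-- ===== VERDICT (by name: the statement is the Claim_ definition above) =====
theorem get_statics_spec : Claim_equal_get_statics := by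
  intro m _
  unfold Spec_get_statics
  rw [hA, hB]
  by_cases hm : 0 ≤ m
  · obtain ⟨n, rfl⟩ : ∃ n : Nat, (n : Int) = m := ⟨m.toNat, Int.toNat_of_nonneg hm⟩
    rw [center]
  · have h1 : pvL m = [] := by
      unfold pvL
      rw [PySem.List.pyRange_one_eq_nil (by omega)]
      rfl
    have h2 : pvOrder m = [] := by
      unfold pvOrder
      have : pvK.filter (fun d => decide (d ≤ m)) = [] :=
        List.filter_eq_nil_iff.mpr (fun x hx => by
          simp
          have := pvK_nonneg x hx
          omega)
      rw [this]
      rfl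
    rw [h1, h2]
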